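-- pv_equiv track=rewrite | github.com/vladmandic/sdnext | modules/rocm.py | parse_gfx_version
-- ===== SOURCE A (Python) =====
-- def parse_gfx_version(name: str) -> int:
--     result = 0
--     for i in range(3, len(name)):
--         if name[i].isdigit():
--             result *= 0x10
--             result += ord(name[i]) - 48
--             continue
--         if name[i] in "abcdef":
--             result *= 0x10
--             result += ord(name[i]) - 87
--             continue
--         break
--     return result
-- ===== SOURCE B (Python) =====
-- def parse_gfx_version(name: str) -> int:
--     # collect the leading valid-hex prefix, then use the library hex parser
--     prefix = ""
--     for c in name[3:]:
--         if not (c.isdigit() or c in "abcdef"):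
--             break
--         prefix += c
--     return int(prefix, 16) if prefix else 0
-- ===== Notes on version B (the rewrite author's own statement) =====
-- stated objective: simpler
-- what changed: Replaced A's manual Horner accumulation loop (result = result*16 + digit, with continue/break) by collecting the leading valid-hex prefix with takewhile and converting it with the library int(prefix, 16).
import Mathlib
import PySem

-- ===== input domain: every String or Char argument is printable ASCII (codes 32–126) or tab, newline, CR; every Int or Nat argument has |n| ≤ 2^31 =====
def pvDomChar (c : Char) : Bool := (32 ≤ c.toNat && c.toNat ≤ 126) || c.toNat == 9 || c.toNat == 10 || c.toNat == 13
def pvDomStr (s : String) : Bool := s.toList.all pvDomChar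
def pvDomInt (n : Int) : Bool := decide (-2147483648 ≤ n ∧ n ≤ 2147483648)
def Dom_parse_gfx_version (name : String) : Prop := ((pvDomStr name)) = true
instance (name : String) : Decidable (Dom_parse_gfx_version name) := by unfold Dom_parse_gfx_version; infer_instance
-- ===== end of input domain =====

-- B replaces A's manual Horner loop with takewhile-prefix + library hex parse (objective: simpler).

-- ===== PORT A =====
-- A's for-loop with continue/break, as structural recursion over the chars from index 3
-- carrying the accumulator `result`.
def parse_gfx_version_go (cs : List Char) (result : Int) : Int :=
  match cs with
  | [] => result
  | c :: rest =>
    if PySem.Chars.isdigit c then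
      parse_gfx_version_go rest (result * 16 + ((c.toNat : Int) - 48))
    else if c ∈ "abcdef".toList then
      parse_gfx_version_go rest (result * 16 + ((c.toNat : Int) - 87))
    else
      result

def parse_gfx_version (name : String) : Int :=
  parse_gfx_version_go (name.toList.drop 3) 0

-- ===== PORT B =====
-- value of one lowercase-hex digit; used to port int(prefix, 16), which is exact here because
-- the takewhile prefix contains only '0'-'9' and 'a'-'f'.
def pvHexDigit (c : Char) : Int :=
  if PySem.Chars.isdigit c then (c.toNat : Int) - 48 else (c.toNat : Int) - 87

def parse_gfx_version_alt (name : String) : Int :=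
  let pfx := (name.toList.drop 3).takeWhile
    (fun c => PySem.Chars.isdigit c || decide (c ∈ "abcdef".toList))
  if pfx = [] then 0
  else pfx.foldl (fun r c => r * 16 + pvHexDigit c) 0

-- ===== PRECONDITION & SPEC =====
def Spec_parse_gfx_version (name : String) (out : Int) : Prop := out = parse_gfx_version_alt name
instance (name : String) (out : Int) : Decidable (Spec_parse_gfx_version name out) := by unfold Spec_parse_gfx_version; infer_instance

-- ===== CLAIM (what is proved, stated in full; the proofs are below) =====
def Claim_equal_parse_gfx_version : Prop := ∀ (name : String), Dom_parse_gfx_version name → Spec_parse_gfx_version name (parse_gfx_version name)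

-- ===== LEMMAS AND PROOFS =====
theorem parse_gfx_version_go_eq (cs : List Char) (r : Int) :
    parse_gfx_version_go cs r =
      (cs.takeWhile (fun c => PySem.Chars.isdigit c || decide (c ∈ "abcdef".toList))).foldl
        (fun r c => r * 16 + pvHexDigit c) r := by
  induction cs generalizing r with
  | nil => simp [parse_gfx_version_go]
  | cons c rest ih =>
    by_cases hd : PySem.Chars.isdigit c = true
    · have hp : (PySem.Chars.isdigit c || decide (c ∈ "abcdef".toList)) = true := by simp [hd]
      rw [parse_gfx_version_go, if_pos hd, ih, List.takeWhile_cons, hp]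
      simp [pvHexDigit, hd]
    · by_cases hm : c ∈ "abcdef".toList
      · have hp : (PySem.Chars.isdigit c || decide (c ∈ "abcdef".toList)) = true := by
          simp only [Bool.or_eq_true, decide_eq_true_eq]; right; simpa using hm
        rw [parse_gfx_version_go, if_neg hd, if_pos hm, ih, List.takeWhile_cons, hp]
        simp [pvHexDigit, hd]
      · have hp : (PySem.Chars.isdigit c || decide (c ∈ "abcdef".toList)) = false := by
          simp at hm ⊢; exact ⟨by simpa using hd, hm⟩
        rw [parse_gfx_version_go, if_neg hd, if_neg hm, List.takeWhile_cons, hp]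
        simp

-- ===== VERDICT (by name: the statement is the Claim_ definition above) =====
theorem parse_gfx_version_spec : Claim_equal_parse_gfx_version := by
  intro name _
  unfold Spec_parse_gfx_version parse_gfx_version parse_gfx_version_alt
  rw [parse_gfx_version_go_eq]
  by_cases h :
      ((name.toList.drop 3).takeWhile
        (fun c => PySem.Chars.isdigit c || decide (c ∈ "abcdef".toList))) = []
  · rw [h]; simp
  · simp only [if_neg h]
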